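-- pv_equiv track=rewrite | github.com/xchatzil/NOVA | notebooks/src/mst_prim.py | create_routes
-- ===== SOURCE A (Python) =====
-- def create_routes(mst):
--     routes = {}
--     for i in range(1, len(mst)):
--         route = []
--         j = i
--         # route from one node
--         while True:
--             node = mst[j]
--             route.append(node)
--             j = mst[j]
--             if j == 0:
--                 routes[i] = route.copy()
--                 break
--     return routes
-- ===== SOURCE B (Python) =====
-- def create_routes(mst):
--     # Memoized top-down path construction: collect the unresolved chain of a node
--     # with an iterative walk, then fill routes parent-first so every shared path
--     # suffix is built once (memo[j] = [parent] + memo[parent]) instead of A's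
--     # per-node while-loop re-chasing the whole parent chain from scratch.
--     routes = {}
--     memo = {}
--     for i in range(1, len(mst)):
--         chain = []
--         j = i
--         while j not in memo and mst[j] != 0:
--             chain.append(j)
--             j = mst[j]
--         if j not in memo:
--             memo[j] = [0]
--         for j in reversed(chain):
--             memo[j] = [mst[j]] + memo[mst[j]]
--         routes[i] = memo[i]
--     return routes
-- ===== Notes on version B (the rewrite author's own statement) =====
-- stated objective: alternative
-- what changed: Replaces A's per-node while-loop that re-chases the whole parent chain from scratch with a memoized pass: an iterative walk collects only the unresolved chain, then fills it parent-first via memo[j] = [mst[j]] + memo[mst[j]], so shared path suffixes are built once.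
-- outside the precondition, e.g. on create_routes([0, -3, 1]): A returns {1: [-3, 0], 2: [1, -3, 0]}, B returns {1: [-3, 0], 2: [1, -3, 0]}
import Mathlib
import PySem

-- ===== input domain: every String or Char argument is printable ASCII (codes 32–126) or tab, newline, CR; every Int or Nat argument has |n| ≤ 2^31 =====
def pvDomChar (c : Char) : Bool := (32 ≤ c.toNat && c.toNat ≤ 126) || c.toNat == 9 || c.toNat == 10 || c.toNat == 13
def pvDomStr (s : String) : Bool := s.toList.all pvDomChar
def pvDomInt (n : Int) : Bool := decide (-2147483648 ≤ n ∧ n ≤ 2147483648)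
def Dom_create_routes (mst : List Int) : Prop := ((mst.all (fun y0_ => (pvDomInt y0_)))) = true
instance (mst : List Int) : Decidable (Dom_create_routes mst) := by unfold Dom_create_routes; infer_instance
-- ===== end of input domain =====

-- B replaces A's per-node while-loop (re-chasing the whole parent chain from scratch)
-- with a memoized pass: walk only the unresolved chain, then fill it parent-first
-- (memo[j] = [mst[j]] + memo[mst[j]]), so shared suffixes are built once (objective: alternative).

-- ===== PORT A =====
-- the inner 'while True' chain walk; fuel only makes it total (inside Pre_ every
-- parent chain reaches 0 within len(mst) steps, so fuel = len(mst) is never exhausted)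
def aChase (mst : List Int) (fuel : Nat) (j : Int) (route : List Int) : List Int :=
  match fuel with
  | 0 => route
  | f + 1 =>
    match PySem.List.pyGet? mst j with
    | none => route                       -- IndexError; excluded by Pre_
    | some node =>
      if node = 0 then route ++ [node]    -- j = mst[j] = 0: routes[i] = route.copy(); break
      else aChase mst f node (route ++ [node])

def create_routes (mst : List Int) : List (Int × List Int) :=
  ((PySem.List.pyRange 1 (mst.length : Int)).foldl
    (fun routes i => routes.insert i (aChase mst mst.length i []))
    (PySem.Dict.empty : PySem.Dict Int (List Int))).items

-- ===== PORT B =====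
-- the 'while j not in memo and mst[j] != 0' walk collecting the unresolved chain;
-- fuel only makes it total (inside Pre_ the walk stops within len(mst) steps)
def bWalk (mst : List Int) (fuel : Nat) (j : Int) (memo : PySem.Dict Int (List Int))
    (chain : List Int) : List Int × Int :=
  match fuel with
  | 0 => (chain, j)
  | f + 1 =>
    if memo.contains j then (chain, j)
    else
      match PySem.List.pyGet? mst j with
      | none => (chain, j)                -- IndexError; excluded by Pre_
      | some p => if p = 0 then (chain, j) else bWalk mst f p memo (chain ++ [j])

-- 'for j in reversed(chain): memo[j] = [mst[j]] + memo[mst[j]]'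
def bFill (mst : List Int) (memo : PySem.Dict Int (List Int)) (chain : List Int) :
    PySem.Dict Int (List Int) :=
  chain.reverse.foldl (fun m j =>
    match PySem.List.pyGet? mst j with
    | none => m                           -- IndexError; excluded by Pre_
    | some p => m.insert j (p :: m.getD p [])) memo

def create_routes_alt (mst : List Int) : List (Int × List Int) :=
  (((PySem.List.pyRange 1 (mst.length : Int)).foldl
    (fun (st : PySem.Dict Int (List Int) × PySem.Dict Int (List Int)) i =>
      let w := bWalk mst mst.length i st.2 []
      let memo1 := if st.2.contains w.2 then st.2 else st.2.insert w.2 [(0 : Int)]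
      let memo2 := bFill mst memo1 w.1
      (st.1.insert i (memo2.getD i []), memo2))
    ((PySem.Dict.empty : PySem.Dict Int (List Int)),
     (PySem.Dict.empty : PySem.Dict Int (List Int)))).1).items

-- ===== PRECONDITION & SPEC =====
-- one parent step in the pointer graph (0, the root, is absorbing; A's walk stops before reading mst[0])
def pvStep (mst : List Int) (j : Nat) : Nat :=
  if j = 0 then 0 else (mst.getD j 0).toNat

-- Pre_ excludes exactly the inputs on which A does not return normally in its natural
-- domain: a parent entry that is negative or ≥ len(mst) (IndexError, or Python's
-- accidental negative-index wraparound — where that wraparound chain happens to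
-- terminate both programs agree, see the cite, but in-range is the natural domain of a
-- parent-pointer array), and a directed cycle among the parent pointers (A's while
-- loop never terminates). Every in-range, cycle-free parent array — any order,
-- forward references included — is admitted.
def Pre_create_routes (mst : List Int) : Prop :=
  (∀ i < mst.length, 1 ≤ i → 0 ≤ mst.getD i 0 ∧ mst.getD i 0 < (mst.length : Int)) ∧
  (∀ i < mst.length, 1 ≤ i → ∀ k < mst.length, (pvStep mst)^[k + 1] i ≠ i)
instance (mst : List Int) : Decidable (Pre_create_routes mst) := by
  unfold Pre_create_routes; infer_instance

def pvWitness_create_routes : List Int := [0, 3, 1, 0]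

def Spec_create_routes (mst : List Int) (out : List (Int × List Int)) : Prop :=
  out = create_routes_alt mst
instance (mst : List Int) (out : List (Int × List Int)) : Decidable (Spec_create_routes mst out) := by
  unfold Spec_create_routes; infer_instance

-- ===== CLAIM (what is proved, stated in full; the proofs are below) =====
def Claim_equal_create_routes : Prop :=
  ∀ (mst : List Int), Dom_create_routes mst → Pre_create_routes mst →
    Spec_create_routes mst (create_routes mst)

-- ===== LEMMAS AND PROOFS =====

-- the route both programs compute for a node, with fuel (stable in the fuel, below)
def routeOfF (mst : List Int) : Nat → Nat → List Int
  | 0, _ => []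
  | f + 1, j =>
    if mst.getD j 0 = 0 then [0] else mst.getD j 0 :: routeOfF mst f (mst.getD j 0).toNat

def RouteI (mst : List Int) (x : Int) : List Int := routeOfF mst mst.length x.toNat

-- 'chain ++ [jend]' is a parent-linked path starting at x
def PathP (mst : List Int) : Int → List Int → Int → Prop
  | x, [], e => e = x
  | x, c :: rest, e =>
    c = x ∧ 1 ≤ x ∧ x < (mst.length : Int) ∧ PathP mst (mst.getD x.toNat 0) rest e

-- every memoized route is correct
def MemoOK (mst : List Int) (m : PySem.Dict Int (List Int)) : Prop :=
  ∀ k : Int, m.contains k = true → m.getD k [] = RouteI mst k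

lemma pyGet_getD (xs : List Int) (j : Int) (h0 : 0 ≤ j) (h : j < xs.length) :
    PySem.List.pyGet? xs j = some (xs.getD j.toNat 0) := by
  have hj : j = ((j.toNat : Nat) : Int) := by omega
  conv_lhs => rw [hj, PySem.List.pyGet?_natCast]
  rw [List.getElem?_eq_getElem (by omega), List.getD_eq_getElem _ _ (by omega)]

lemma step_lt (mst : List Int)
    (hb : ∀ i < mst.length, 1 ≤ i → 0 ≤ mst.getD i 0 ∧ mst.getD i 0 < (mst.length : Int)) :
    ∀ j < mst.length, pvStep mst j < mst.length := by
  intro j hj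
  unfold pvStep
  split_ifs with h
  · omega
  · have := hb j hj (by omega)
    omega

lemma iterate_step_lt (mst : List Int)
    (hb : ∀ i < mst.length, 1 ≤ i → 0 ≤ mst.getD i 0 ∧ mst.getD i 0 < (mst.length : Int)) :
    ∀ k j, j < mst.length → (pvStep mst)^[k] j < mst.length := by
  intro k
  induction k with
  | zero => intro j hj; simpa using hj
  | succ k ih =>
    intro j hj
    rw [Function.iterate_succ_apply]
    exact ih _ (step_lt mst hb j hj)

lemma step_absorb (mst : List Int) : ∀ k, (pvStep mst)^[k] 0 = 0 := by
  intro k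
  induction k with
  | zero => rfl
  | succ k ih => rw [Function.iterate_succ_apply, pvStep, if_pos rfl]; exact ih

lemma iterate_zero_mono (mst : List Int) {a b : Nat} {j : Nat}
    (h : (pvStep mst)^[a] j = 0) (hab : a ≤ b) : (pvStep mst)^[b] j = 0 := by
  have : b = (b - a) + a := by omega
  rw [this, Function.iterate_add_apply, h, step_absorb]

-- pigeonhole: inside Pre_ every parent chain reaches the root within n steps
lemma reach_zero (mst : List Int) (h : Pre_create_routes mst) :
    ∀ i < mst.length, (pvStep mst)^[mst.length] i = 0 := by
  obtain ⟨hb, hc⟩ := h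
  intro i hi
  by_contra hne
  have hnz : ∀ k ≤ mst.length, (pvStep mst)^[k] i ≠ 0 := by
    intro k hk hz
    exact hne (iterate_zero_mono mst hz hk)
  have hmaps : ∀ k ∈ Finset.range (mst.length + 1),
      (pvStep mst)^[k] i ∈ Finset.Ico 1 mst.length := by
    intro k hk
    rw [Finset.mem_range] at hk
    rw [Finset.mem_Ico]
    have h1 := iterate_step_lt mst hb k i hi
    have h2 := hnz k (by omega)
    omega
  have hcard : (Finset.Ico 1 mst.length).card < (Finset.range (mst.length + 1)).card := by
    rw [Nat.card_Ico, Finset.card_range]; omega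
  obtain ⟨a, ha, b, hbm, hab, heq⟩ :=
    Finset.exists_ne_map_eq_of_card_lt_of_maps_to hcard hmaps
  rw [Finset.mem_range] at ha hbm
  -- wlog a < b
  rcases Nat.lt_or_ge a b with hlt | hge
  · have hj := hmaps a (Finset.mem_range.mpr ha)
    rw [Finset.mem_Ico] at hj
    have : (pvStep mst)^[(b - a - 1) + 1] ((pvStep mst)^[a] i) = (pvStep mst)^[a] i := by
      rw [← Function.iterate_add_apply]
      have : (b - a - 1) + 1 + a = b := by omega
      rw [this, heq]
    exact hc _ hj.2 hj.1 (b - a - 1) (by omega) this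
  · have hlt : b < a := by omega
    have hj := hmaps b (Finset.mem_range.mpr hbm)
    rw [Finset.mem_Ico] at hj
    have : (pvStep mst)^[(a - b - 1) + 1] ((pvStep mst)^[b] i) = (pvStep mst)^[b] i := by
      rw [← Function.iterate_add_apply]
      have : (a - b - 1) + 1 + b = a := by omega
      rw [this, heq]
    exact hc _ hj.2 hj.1 (a - b - 1) (by omega) this

lemma routeOfF_stable (mst : List Int)
    (hb : ∀ i < mst.length, 1 ≤ i → 0 ≤ mst.getD i 0 ∧ mst.getD i 0 < (mst.length : Int)) :
    ∀ f g j, 1 ≤ j → j < mst.length → (pvStep mst)^[f] j = 0 → (pvStep mst)^[g] j = 0 →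
      routeOfF mst f j = routeOfF mst g j := by
  intro f
  induction f with
  | zero =>
    intro g j h1 _ hf
    simp only [Function.iterate_zero_apply] at hf; omega
  | succ f ih =>
    intro g j h1 h2 hf hg
    match g with
    | 0 => simp only [Function.iterate_zero_apply] at hg; omega
    | g + 1 =>
      simp only [routeOfF]
      by_cases hz : mst.getD j 0 = 0
      · rw [if_pos hz, if_pos hz]
      · rw [if_neg hz, if_neg hz]
        have hbj := hb j h2 h1
        have hstep : pvStep mst j = (mst.getD j 0).toNat := by
          unfold pvStep; rw [if_neg (by omega)]
        congr 1
        exact ih g (mst.getD j 0).toNat (by omega) (by omega)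
          (by rw [← hstep, ← Function.iterate_succ_apply]; exact hf)
          (by rw [← hstep, ← Function.iterate_succ_apply]; exact hg)

lemma route_base (mst : List Int) (x : Int) (hn : 0 < mst.length)
    (hz : mst.getD x.toNat 0 = 0) : RouteI mst x = [0] := by
  unfold RouteI
  have : mst.length = (mst.length - 1) + 1 := by omega
  rw [this, routeOfF, if_pos hz]

lemma route_cons (mst : List Int) (h : Pre_create_routes mst) (x : Int)
    (h1 : 1 ≤ x) (h2 : x < (mst.length : Int)) (hz : mst.getD x.toNat 0 ≠ 0) :
    RouteI mst x = mst.getD x.toNat 0 :: RouteI mst (mst.getD x.toNat 0) := by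
  have hb := h.1
  have hbx := hb x.toNat (by omega) (by omega)
  have hstep : pvStep mst x.toNat = (mst.getD x.toNat 0).toNat := by
    unfold pvStep; rw [if_neg (by omega)]
  have hreach := reach_zero mst h x.toNat (by omega)
  have hn : 0 < mst.length := by omega
  unfold RouteI
  conv_lhs => rw [show mst.length = (mst.length - 1) + 1 by omega]
  rw [routeOfF, if_neg hz]
  congr 1
  apply routeOfF_stable mst hb (mst.length - 1) mst.length (mst.getD x.toNat 0).toNat
  · omega
  · omega
  · have : (pvStep mst)^[mst.length] x.toNat =
        (pvStep mst)^[mst.length - 1] (pvStep mst x.toNat) := by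
      conv_lhs => rw [show mst.length = (mst.length - 1) + 1 by omega]
      rw [Function.iterate_succ_apply]
    rw [this, hstep] at hreach
    exact hreach
  · have h' : (pvStep mst)^[mst.length + 1] x.toNat = 0 :=
      iterate_zero_mono mst hreach (by omega)
    rw [Function.iterate_succ_apply, hstep] at h'
    exact h'

-- ===== A-side =====
lemma aChase_eq (mst : List Int)
    (hb : ∀ i < mst.length, 1 ≤ i → 0 ≤ mst.getD i 0 ∧ mst.getD i 0 < (mst.length : Int)) :
    ∀ f (j : Int), 1 ≤ j → j < (mst.length : Int) → (pvStep mst)^[f] j.toNat = 0 →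
      ∀ acc, aChase mst f j acc = acc ++ routeOfF mst f j.toNat := by
  intro f
  induction f with
  | zero =>
    intro j h1 _ hf
    simp only [Function.iterate_zero_apply] at hf; omega
  | succ f ih =>
    intro j h1 h2 hf acc
    rw [aChase, pyGet_getD mst j (by omega) (by exact_mod_cast h2)]
    simp only
    have hbj := hb j.toNat (by omega) (by omega)
    by_cases hz : mst.getD j.toNat 0 = 0
    · rw [if_pos hz, routeOfF, if_pos hz, hz]
    · rw [if_neg hz, routeOfF, if_neg hz]
      have hstep : pvStep mst j.toNat = (mst.getD j.toNat 0).toNat := by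
        unfold pvStep; rw [if_neg (by omega)]
      rw [ih (mst.getD j.toNat 0) (by omega) (by omega)
        (by rw [← hstep, ← Function.iterate_succ_apply]; exact hf)]
      simp

-- the routes dict both programs have built after processing i = 1 … m
def builtDict (mst : List Int) (m : Nat) : PySem.Dict Int (List Int) :=
  PySem.Dict.mk ((List.range' 1 m).map (fun i => (((i : Nat) : Int), RouteI mst ((i : Nat) : Int))))

lemma builtDict_keys (mst : List Int) (m : Nat) :
    (builtDict mst m).keys = (List.range' 1 m).map (fun i => ((i : Nat) : Int)) := by
  simp [builtDict, PySem.Dict.keys_mk]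

lemma builtDict_not_contains (mst : List Int) (m : Nat) :
    (builtDict mst m).contains ((m + 1 : Nat) : Int) = false := by
  rw [PySem.Dict.contains_eq_decide_mem_keys, builtDict_keys]
  simp only [decide_eq_false_iff_not, List.mem_map]
  rintro ⟨i, hi, hie⟩
  rw [List.mem_range'_1] at hi
  omega

lemma builtDict_insert (mst : List Int) (m : Nat) (v : List Int)
    (hv : v = RouteI mst ((m + 1 : Nat) : Int)) :
    (builtDict mst m).insert ((m + 1 : Nat) : Int) v = builtDict mst (m + 1) := by
  apply PySem.Dict.ext
  rw [PySem.Dict.items_insert_of_not_contains _ _ (builtDict_not_contains mst m)]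
  simp only [builtDict, hv, List.range'_concat, List.map_append, List.map_cons, List.map_nil]
  norm_num
  exact ⟨by ring, by (congr 1; omega)⟩

lemma range_cast_succ (m : Nat) :
    PySem.List.pyRange 1 ((1 + (m + 1) : Nat) : Int) =
      PySem.List.pyRange 1 ((1 + m : Nat) : Int) ++ [((m + 1 : Nat) : Int)] := by
  have h : ((1 + (m + 1) : Nat) : Int) = ((1 + m : Nat) : Int) + 1 := by push_cast; ring
  rw [h, PySem.List.pyRange_one_succ_right (by push_cast; omega)]
  congr 1
  simp
  omega

lemma a_fold (mst : List Int) (h : Pre_create_routes mst) :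
    ∀ m, 1 + m ≤ mst.length →
      (PySem.List.pyRange 1 ((1 + m : Nat) : Int)).foldl
        (fun routes i => routes.insert i (aChase mst mst.length i []))
        (PySem.Dict.empty : PySem.Dict Int (List Int)) = builtDict mst m := by
  intro m
  induction m with
  | zero => intro _; rfl
  | succ m ih =>
    intro hm
    rw [range_cast_succ, List.foldl_append, ih (by omega)]
    simp only [List.foldl_cons, List.foldl_nil]
    apply builtDict_insert
    rw [aChase_eq mst h.1 mst.length ((m + 1 : Nat) : Int) (by omega) (by push_cast; omega)
      (by rw [Int.toNat_natCast]; exact reach_zero mst h (m + 1) (by omega)) []]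
    simp [RouteI]

-- ===== B-side =====
lemma pathP_start_pos (mst : List Int) (x : Int) (ext : List Int) (jend : Int)
    (hj : 1 ≤ jend) (hp : PathP mst x ext jend) : 1 ≤ x := by
  match ext with
  | [] => simp only [PathP] at hp; omega
  | c :: rest => exact hp.2.1

lemma walk_spec (mst : List Int)
    (hb : ∀ i < mst.length, 1 ≤ i → 0 ≤ mst.getD i 0 ∧ mst.getD i 0 < (mst.length : Int)) :
    ∀ f (j : Int) (memo : PySem.Dict Int (List Int)) chain,
      1 ≤ j → j < (mst.length : Int) → (pvStep mst)^[f] j.toNat = 0 →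
      ∃ ext jend, bWalk mst f j memo chain = (chain ++ ext, jend) ∧
        PathP mst j ext jend ∧ 1 ≤ jend ∧ jend < (mst.length : Int) ∧
        (memo.contains jend = true ∨
          (memo.contains jend = false ∧ mst.getD jend.toNat 0 = 0)) := by
  intro f
  induction f with
  | zero =>
    intro j _ _ h1 _ hf
    simp only [Function.iterate_zero_apply] at hf; omega
  | succ f ih =>
    intro j memo chain h1 h2 hf
    rw [bWalk]
    by_cases hc : memo.contains j = true
    · exact ⟨[], j, by rw [if_pos hc]; simp, by simp [PathP], h1, h2, Or.inl hc⟩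
    · rw [if_neg hc, pyGet_getD mst j (by omega) (by exact_mod_cast h2)]
      simp only
      have hbj := hb j.toNat (by omega) (by omega)
      by_cases hz : mst.getD j.toNat 0 = 0
      · exact ⟨[], j, by rw [if_pos hz]; simp, by simp [PathP], h1, h2,
          Or.inr ⟨by simpa using hc, hz⟩⟩
      · rw [if_neg hz]
        have hstep : pvStep mst j.toNat = (mst.getD j.toNat 0).toNat := by
          unfold pvStep; rw [if_neg (by omega)]
        obtain ⟨ext, jend, heq, hpath, hj1, hj2, hres⟩ :=
          ih (mst.getD j.toNat 0) memo (chain ++ [j]) (by omega) (by omega)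
            (by rw [← hstep, ← Function.iterate_succ_apply]; exact hf)
        exact ⟨j :: ext, jend, by rw [heq]; simp,
          ⟨rfl, h1, h2, hpath⟩, hj1, hj2, hres⟩

lemma fill_spec (mst : List Int) (h : Pre_create_routes mst) :
    ∀ (ext : List Int) (x jend : Int) (m : PySem.Dict Int (List Int)),
      MemoOK mst m → m.contains jend = true → 1 ≤ jend →
      PathP mst x ext jend →
      MemoOK mst (bFill mst m ext) ∧ (bFill mst m ext).contains x = true := by
  intro ext
  induction ext with
  | nil =>
    intro x jend m hok hcont _ hp
    simp only [PathP] at hp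
    subst hp
    exact ⟨hok, hcont⟩
  | cons c rest ih =>
    intro x jend m hok hcont hj1 hp
    obtain ⟨hcx, hx1, hx2, hrest⟩ := hp
    subst hcx
    have step : bFill mst m (c :: rest) =
        (match PySem.List.pyGet? mst c with
         | none => bFill mst m rest
         | some p => (bFill mst m rest).insert c (p :: (bFill mst m rest).getD p [])) := by
      unfold bFill
      rw [List.reverse_cons, List.foldl_append]
      simp
    obtain ⟨hok2, hcont2⟩ := ih (mst.getD c.toNat 0) jend m hok hcont hj1 hrest
    have hp1 : 1 ≤ mst.getD c.toNat 0 := pathP_start_pos mst _ rest jend hj1 hrest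
    rw [step, pyGet_getD mst c (by omega) (by exact_mod_cast hx2)]
    simp only
    have hval : (bFill mst m rest).getD (mst.getD c.toNat 0) [] =
        RouteI mst (mst.getD c.toNat 0) := hok2 _ hcont2
    have hroute : mst.getD c.toNat 0 :: RouteI mst (mst.getD c.toNat 0) = RouteI mst c :=
      (route_cons mst h c hx1 hx2 (by omega)).symm
    constructor
    · intro k hk
      rw [PySem.Dict.contains_insert] at hk
      by_cases hkx : k = c
      · subst hkx
        rw [PySem.Dict.getD_insert_self, hval, hroute]
      · rw [PySem.Dict.getD_insert_of_ne _ _ _ hkx]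
        apply hok2
        simpa [hkx] using hk
    · exact PySem.Dict.contains_insert_self _ _ _

lemma b_step (mst : List Int) (h : Pre_create_routes mst) (i : Int)
    (h1 : 1 ≤ i) (h2 : i < (mst.length : Int)) (memo : PySem.Dict Int (List Int))
    (hok : MemoOK mst memo) :
    ∃ memo2 : PySem.Dict Int (List Int),
      (let w := bWalk mst mst.length i memo []
       let memo1 := if memo.contains w.2 then memo else memo.insert w.2 [(0 : Int)]
       bFill mst memo1 w.1) = memo2 ∧ MemoOK mst memo2 ∧
      memo2.getD i [] = RouteI mst i := by
  have hreach : (pvStep mst)^[mst.length] i.toNat = 0 := by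
    have := reach_zero mst h i.toNat (by omega)
    exact this
  obtain ⟨ext, jend, heq, hpath, hj1, hj2, hres⟩ :=
    walk_spec mst h.1 mst.length i memo [] h1 h2 hreach
  have hn : 0 < mst.length := by omega
  refine ⟨_, rfl, ?_⟩
  rw [heq]
  simp only [List.nil_append]
  rcases hres with hcont | ⟨hncont, hzero⟩
  · rw [if_pos hcont]
    obtain ⟨hok2, hcont2⟩ := fill_spec mst h ext i jend memo hok hcont hj1 hpath
    exact ⟨hok2, hok2 i hcont2⟩
  · rw [hncont]
    simp only [Bool.false_eq_true, if_false]
    have hok1 : MemoOK mst (memo.insert jend [(0 : Int)]) := by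
      intro k hk
      by_cases hkj : k = jend
      · subst hkj
        rw [PySem.Dict.getD_insert_self, route_base mst k hn hzero]
      · rw [PySem.Dict.getD_insert_of_ne _ _ _ hkj]
        apply hok
        rw [PySem.Dict.contains_insert] at hk
        simpa [hkj] using hk
    obtain ⟨hok2, hcont2⟩ := fill_spec mst h ext i jend (memo.insert jend [(0 : Int)])
      hok1 (PySem.Dict.contains_insert_self _ _ _) hj1 hpath
    exact ⟨hok2, hok2 i hcont2⟩

lemma b_fold (mst : List Int) (h : Pre_create_routes mst) :
    ∀ m, 1 + m ≤ mst.length →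
      ∃ mem : PySem.Dict Int (List Int),
        (PySem.List.pyRange 1 ((1 + m : Nat) : Int)).foldl
          (fun (st : PySem.Dict Int (List Int) × PySem.Dict Int (List Int)) i =>
            let w := bWalk mst mst.length i st.2 []
            let memo1 := if st.2.contains w.2 then st.2 else st.2.insert w.2 [(0 : Int)]
            let memo2 := bFill mst memo1 w.1
            (st.1.insert i (memo2.getD i []), memo2))
          ((PySem.Dict.empty : PySem.Dict Int (List Int)),
           (PySem.Dict.empty : PySem.Dict Int (List Int))) = (builtDict mst m, mem) ∧
        MemoOK mst mem := by
  intro m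
  induction m with
  | zero =>
    intro _
    refine ⟨PySem.Dict.empty, rfl, ?_⟩
    intro k hk
    simp [PySem.Dict.contains_empty] at hk
  | succ m ih =>
    intro hm
    obtain ⟨mem, heq, hok⟩ := ih (by omega)
    obtain ⟨memo2, heq2, hok2, hval⟩ := b_step mst h ((m + 1 : Nat) : Int)
      (by push_cast; omega) (by push_cast; omega) mem hok
    refine ⟨memo2, ?_, hok2⟩
    rw [range_cast_succ, List.foldl_append, heq]
    simp only [List.foldl_cons, List.foldl_nil]
    rw [heq2, hval]
    rw [builtDict_insert mst m _ rfl]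

-- ===== VERDICT (by name: the statement is the Claim_ definition above) =====
theorem create_routes_spec : Claim_equal_create_routes := by
  intro mst _ hpre
  unfold Spec_create_routes create_routes create_routes_alt
  rcases Nat.eq_zero_or_pos mst.length with hn | hn
  · rw [hn]; rfl
  · have ea := a_fold mst hpre (mst.length - 1) (by omega)
    obtain ⟨mem, eb, _⟩ := b_fold mst hpre (mst.length - 1) (by omega)
    have hc : ((1 + (mst.length - 1) : Nat) : Int) = (mst.length : Int) := by omega
    rw [hc] at ea eb
    rw [ea, eb]
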